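-- pv_equiv track=rewrite | github.com/ArchTangent-study/data-structures | python/breadth-first-search/breadth_first_search_2.py | bfs_inner
-- ===== SOURCE A (Python) =====
-- from typing import Dict, Optional, Set
--
-- def bfs_inner(graph: Dict, source, target, depth: int, searched: Set):
--     to_check = []
--
--     if source in graph and source not in searched:
--         for edge in graph[source]:
--             if edge == target:
--                 return depth
--             else:
--                 to_check.append(edge)
--         # If target wasn't found at this depth:
--         # - add current node to `searched` set (avoids cycles)
--         # - perform BFS on next depth
--         searched.add(source)
--         for new_source in to_check:
--             new_bfs = bfs_inner(graph, new_source, target, depth + 1, searched)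
--             if new_bfs is not None:
--                 return new_bfs
--
--     # Target was not found
--     return None
-- ===== SOURCE B (Python) =====
-- def bfs_inner(graph, source, target, depth, searched):
--     # Iterative DFS with an explicit stack of (node, depth) pairs instead of recursion.
--     # Mutates `searched` exactly like the recursive original.
--     stack = [(source, depth)]
--     while stack:
--         cur, d = stack.pop()
--         if cur not in graph or cur in searched:
--             continue
--         edges = graph[cur]
--         if target in edges:
--             return d
--         searched.add(cur)
--         for e in reversed(edges):
--             stack.append((e, d + 1))
--     return None
-- ===== Notes on version B (the rewrite author's own statement) =====
-- stated objective: alternative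
-- what changed: Replaced the recursive depth-first search (recursion per node, pending-children list per frame) by a single iterative while-loop over an explicit stack of (node, depth) pairs pushed in reversed edge order, reproducing the exact visit order, returned depth and mutation of the shared searched set.
import Mathlib
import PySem

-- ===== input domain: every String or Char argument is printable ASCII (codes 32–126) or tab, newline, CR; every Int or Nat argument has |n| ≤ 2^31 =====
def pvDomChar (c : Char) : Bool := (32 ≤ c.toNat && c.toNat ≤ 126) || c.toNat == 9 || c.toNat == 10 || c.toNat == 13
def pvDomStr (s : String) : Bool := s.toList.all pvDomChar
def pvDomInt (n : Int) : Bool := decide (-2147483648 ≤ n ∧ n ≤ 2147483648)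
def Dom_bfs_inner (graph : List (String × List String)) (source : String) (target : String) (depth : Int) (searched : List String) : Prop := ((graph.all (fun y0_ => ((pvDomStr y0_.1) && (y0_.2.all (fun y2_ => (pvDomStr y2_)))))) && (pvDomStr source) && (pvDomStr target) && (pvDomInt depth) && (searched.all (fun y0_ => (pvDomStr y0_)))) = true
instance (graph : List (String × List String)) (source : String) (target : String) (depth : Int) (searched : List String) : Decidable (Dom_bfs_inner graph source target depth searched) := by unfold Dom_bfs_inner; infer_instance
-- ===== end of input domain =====

-- B replaces A's recursion by an iterative DFS over an explicit stack of (node, depth) pairs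
-- (same return value; both Pythons mutate `searched` identically — the theorem is about the return value).


-- ===== PORT A =====
-- number of graph keys not yet in the searched set (termination measure for A's recursion)
def pvUnseen (graph : List (String × List String)) (s : List String) : Nat :=
  ((graph.map Prod.fst).filter (fun k => !(PySem.Set.contains s k))).length

-- `for edge in graph[source]: if edge == target: return depth else: to_check.append(edge)`
def pvScan (target : String) (depth : Int) : List String → List String → Option Int × List String
  | [], to_check => (none, to_check)
  | e :: rest, to_check =>
    if e == target then (some depth, to_check)
    else pvScan target depth rest (to_check ++ [e])

theorem pvFilterLenLe {α : Type} (p q : α → Bool) :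
    ∀ l : List α, (∀ k ∈ l, q k = true → p k = true) →
      (l.filter q).length ≤ (l.filter p).length := by
  intro l
  induction l with
  | nil => simp
  | cons a l ih =>
    intro h
    have hl := ih (fun k hk => h k (List.mem_cons_of_mem _ hk))
    by_cases hq : q a = true
    · have hp := h a (List.mem_cons_self ..) hq
      simp only [List.filter_cons, hq, hp, if_pos, List.length_cons]
      omega
    · have hq' : q a = false := eq_false_of_ne_true hq
      by_cases hp : p a = true <;>
        simp only [List.filter_cons, hq', hp, Bool.false_eq_true, if_false, if_true,
          List.length_cons] <;> omega

theorem pvFilterLenLt {α : Type} (p q : α → Bool) (x : α) :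
    ∀ l : List α, x ∈ l → (∀ k ∈ l, q k = true → p k = true) →
      q x = false → p x = true → (l.filter q).length < (l.filter p).length := by
  intro l
  induction l with
  | nil => intro hmem; simp at hmem
  | cons a l ih =>
    intro hmem h hq hp
    have hl := pvFilterLenLe p q l (fun k hk => h k (List.mem_cons_of_mem _ hk))
    rcases List.mem_cons.mp hmem with rfl | hx
    · simp only [List.filter_cons, hq, hp, Bool.false_eq_true, if_false, if_true,
        List.length_cons]
      omega
    · have hlt := ih hx (fun k hk => h k (List.mem_cons_of_mem _ hk)) hq hp
      by_cases hqa : q a = true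
      · have hpa := h a (List.mem_cons_self ..) hqa
        simp only [List.filter_cons, hqa, hpa, if_pos, List.length_cons]
        omega
      · have hqa' : q a = false := eq_false_of_ne_true hqa
        by_cases hpa : p a = true <;>
          simp only [List.filter_cons, hqa', hpa, Bool.false_eq_true, if_false, if_true,
            List.length_cons] <;> omega

theorem pvUnseen_add_lt (graph : List (String × List String)) (s : List String) (src : String)
    (hmem : src ∈ graph.map Prod.fst) (hc : PySem.Set.contains s src = false) :
    pvUnseen graph (PySem.Set.add s src) < pvUnseen graph s := by
  have hns : src ∉ s := by simpa using hc
  rw [pvUnseen, pvUnseen, PySem.Set.add_of_not_mem hns]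
  apply pvFilterLenLt _ _ src _ hmem
  · intro k hk hqk
    simp at hqk ⊢
    exact hqk.1
  · simp
  · simpa using hns

theorem pvLookup_mem {β : Type} (graph : List (String × β)) (k : String) (v : β)
    (h : List.lookup k graph = some v) : k ∈ graph.map Prod.fst := by
  induction graph with
  | nil => simp [List.lookup] at h
  | cons a l ih =>
    obtain ⟨k', v'⟩ := a
    simp only [List.lookup] at h
    cases he : (k == k') with
    | true =>
      simp only [List.map_cons, List.mem_cons]
      exact Or.inl (by simpa using he)
    | false =>
      rw [he] at h
      simp only [List.map_cons, List.mem_cons]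
      exact Or.inr (ih h)

-- the recursive body of A: runs A's body on each source of `srcs` in turn at depth `d`,
-- threading the `searched` set; the subtype on the returned set is only termination bookkeeping
def pvRunA (graph : List (String × List String)) (target : String) :
    (srcs : List String) → (d : Int) → (s : List String) →
    Option Int × {s' : List String // pvUnseen graph s' ≤ pvUnseen graph s}
  | [], _, s => (none, ⟨s, le_rfl⟩)
  | src :: rest, d, s =>
    match hlk : List.lookup src graph with
    | none =>
      let out := pvRunA graph target rest d s
      (out.1, out.2)
    | some edges =>
      if hc : PySem.Set.contains s src = true then
        let out := pvRunA graph target rest d s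
        (out.1, out.2)
      else
        match pvScan target d edges [] with
        | (some r, _) => (some r, ⟨s, le_rfl⟩)
        | (none, to_check) =>
          have hdec : pvUnseen graph (PySem.Set.add s src) < pvUnseen graph s :=
            pvUnseen_add_lt graph s src (pvLookup_mem graph src edges hlk)
              (by simpa using hc)
          match pvRunA graph target to_check (d + 1) (PySem.Set.add s src) with
          | (some r, ⟨s₂, h₂⟩) => (some r, ⟨s₂, le_trans h₂ hdec.le⟩)
          | (none, ⟨s₂, h₂⟩) =>
            let out := pvRunA graph target rest d s₂
            (out.1, ⟨out.2.1, le_trans out.2.2 (le_trans h₂ hdec.le)⟩)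
  termination_by srcs _d s => (pvUnseen graph s, srcs.length)
  decreasing_by
  · exact Prod.Lex.right _ (Nat.lt_succ_self _)
  · exact Prod.Lex.right _ (Nat.lt_succ_self _)
  · exact Prod.Lex.left _ _ hdec
  · exact Prod.Lex.left _ _ (lt_of_le_of_lt h₂ hdec)

def bfs_inner (graph : List (String × List String)) (source : String) (target : String) (depth : Int) (searched : List String) : Option Int :=
  (pvRunA graph target [source] depth searched).1

-- ===== PORT B =====
-- total number of edge-list entries in the graph (used only to size the fuel below)
def pvEdgeTotal (graph : List (String × List String)) : Nat :=
  (graph.map (fun p => p.2.length)).sum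

-- the while-loop of Source B, structurally recursive on a fuel counter (a totality device only:
-- the fuel below is proved sufficient, the loop body is Source B's body step for step):
-- pop (cur, d); skip if cur ∉ graph or cur ∈ searched; return d if target is among cur's
-- edges; else mark cur searched and push the edges in reversed order at depth d+1
def pvRunBF (graph : List (String × List String)) (target : String) :
    Nat → List (String × Int) → List String → Option Int
  | 0, _, _ => none
  | _ + 1, [], _ => none
  | f + 1, (cur, d) :: stack, s =>
    match List.lookup cur graph with
    | none => pvRunBF graph target f stack s
    | some edges =>
      if PySem.Set.contains s cur then pvRunBF graph target f stack s
      else if edges.contains target then some d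
      else
        pvRunBF graph target f
          (edges.reverse.foldl (fun st e => (e, d + 1) :: st) stack)
          (PySem.Set.add s cur)

-- an over-approximation of the number of loop iterations (fuel for pvRunBF)
def pvFuel (graph : List (String × List String)) (stack : List (String × Int)) : Nat :=
  stack.length + (pvEdgeTotal graph + 1) * graph.length

def bfs_inner_alt (graph : List (String × List String)) (source : String) (target : String) (depth : Int) (searched : List String) : Option Int :=
  pvRunBF graph target (pvFuel graph [(source, depth)]) [(source, depth)] searched

-- ===== PRECONDITION & SPEC =====
def Pre_bfs_inner (graph : List (String × List String)) (source : String) (target : String) (depth : Int) (searched : List String) : Prop := True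
-- A is total: it returns a value on every input (e.g. graph [("node", ["edge", "start"])],
-- source "node", target "edge"), so Pre_ admits every input.
instance (graph : List (String × List String)) (source : String) (target : String) (depth : Int) (searched : List String) : Decidable (Pre_bfs_inner graph source target depth searched) := by unfold Pre_bfs_inner; infer_instance
def pvWitness_bfs_inner : (List (String × List String)) × String × String × Int × List String := ([("a", ["b"])], "a", "b", 0, [])
def Spec_bfs_inner (graph : List (String × List String)) (source : String) (target : String) (depth : Int) (searched : List String) (out : Option Int) : Prop := out = bfs_inner_alt graph source target depth searched
instance (graph : List (String × List String)) (source : String) (target : String) (depth : Int) (searched : List String) (out : Option Int) : Decidable (Spec_bfs_inner graph source target depth searched out) := by unfold Spec_bfs_inner; infer_instance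

-- ===== CLAIM (what is proved, stated in full; the proofs are below) =====
def Claim_equal_bfs_inner : Prop := ∀ (graph : List (String × List String)) (source : String) (target : String) (depth : Int) (searched : List String), Dom_bfs_inner graph source target depth searched → Pre_bfs_inner graph source target depth searched → Spec_bfs_inner graph source target depth searched (bfs_inner graph source target depth searched)

-- ===== LEMMAS AND PROOFS =====

-- the exact iteration measure the fuel dominates
def pvMu (graph : List (String × List String)) (stack : List (String × Int)) (s : List String) : Nat :=
  stack.length + (pvEdgeTotal graph + 1) * pvUnseen graph s

theorem pvRunBF_nil (graph : List (String × List String)) (target : String) (f : Nat)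
    (s : List String) : pvRunBF graph target f [] s = none := by
  cases f <;> rfl

theorem pvLookup_len (graph : List (String × List String)) (k : String) (v : List String)
    (h : List.lookup k graph = some v) : v.length ≤ pvEdgeTotal graph := by
  induction graph with
  | nil => simp [List.lookup] at h
  | cons a l ih =>
    obtain ⟨k', v'⟩ := a
    simp only [List.lookup] at h
    cases he : (k == k') with
    | true =>
      rw [he] at h
      injection h with h
      subst h
      simp [pvEdgeTotal]
    | false =>
      rw [he] at h
      have := ih h
      simp only [pvEdgeTotal, List.map_cons, List.sum_cons] at this ⊢
      omega

theorem pvUnseen_le (graph : List (String × List String)) (s : List String) :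
    pvUnseen graph s ≤ graph.length := by
  calc pvUnseen graph s ≤ (graph.map Prod.fst).length := List.length_filter_le _ _
    _ = graph.length := List.length_map ..

theorem pvMu_le_fuel (graph : List (String × List String)) (stack : List (String × Int))
    (s : List String) : pvMu graph stack s ≤ pvFuel graph stack := by
  have h := pvUnseen_le graph s
  have h2 := Nat.mul_le_mul_left (pvEdgeTotal graph + 1) h
  simp only [pvMu, pvFuel]
  omega

theorem pvMu_push (graph : List (String × List String)) (cur : String) (d : Int)
    (stack : List (String × Int)) (s edges : List String)
    (hlk : List.lookup cur graph = some edges) (hc : PySem.Set.contains s cur = false) :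
    pvMu graph (edges.map (fun e => (e, d + 1)) ++ stack) (PySem.Set.add s cur) + 1 ≤
      pvMu graph ((cur, d) :: stack) s := by
  have h1 : edges.length ≤ pvEdgeTotal graph := pvLookup_len graph cur edges hlk
  have h2 : pvUnseen graph (PySem.Set.add s cur) < pvUnseen graph s :=
    pvUnseen_add_lt graph s cur (pvLookup_mem graph cur edges hlk) hc
  have h3 := Nat.mul_le_mul_left (pvEdgeTotal graph + 1) (Nat.succ_le_of_lt h2)
  have h4 : (pvEdgeTotal graph + 1) * (pvUnseen graph (PySem.Set.add s cur) + 1)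
      = (pvEdgeTotal graph + 1) * pvUnseen graph (PySem.Set.add s cur)
        + (pvEdgeTotal graph + 1) := by ring
  rw [h4] at h3
  simp only [pvMu, List.length_append, List.length_map, List.length_cons]
  omega

-- any fuel at least pvMu gives the same answer
theorem pvStable (graph : List (String × List String)) (target : String) :
    ∀ f1 : Nat, ∀ (stack : List (String × Int)) (s : List String) (f2 : Nat),
      pvMu graph stack s ≤ f1 → pvMu graph stack s ≤ f2 →
      pvRunBF graph target f1 stack s = pvRunBF graph target f2 stack s := by
  intro f1
  induction f1 with
  | zero =>
    intro stack s f2 h1 _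
    have hlen : stack.length = 0 := by simp only [pvMu] at h1; omega
    rw [List.length_eq_zero_iff.mp hlen, pvRunBF_nil, pvRunBF_nil]
  | succ f ih =>
    intro stack s f2 h1 h2
    cases stack with
    | nil => rw [pvRunBF_nil, pvRunBF_nil]
    | cons hd stack =>
      obtain ⟨cur, d⟩ := hd
      have hmu : pvMu graph stack s + 1 = pvMu graph ((cur, d) :: stack) s := by
        simp only [pvMu, List.length_cons]; omega
      have hpos : 1 ≤ pvMu graph ((cur, d) :: stack) s := by
        simp only [pvMu, List.length_cons]; omega
      obtain ⟨f2', rfl⟩ : ∃ f2', f2 = f2' + 1 := by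
        cases f2 with
        | zero => omega
        | succ m => exact ⟨m, rfl⟩
      simp only [pvRunBF]
      cases hlk : List.lookup cur graph with
      | none =>
        exact ih stack s f2' (by omega) (by omega)
      | some edges =>
        cases hc : PySem.Set.contains s cur with
        | true =>
          simp only [if_true]
          exact ih stack s f2' (by omega) (by omega)
        | false =>
          simp only [Bool.false_eq_true, if_false]
          cases hT : edges.contains target with
          | true => simp
          | false =>
            simp only [Bool.false_eq_true, if_false]
            have hfold : edges.reverse.foldl (fun st e => (e, d + 1) :: st) stack
                = edges.map (fun e => (e, d + 1)) ++ stack := by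
              induction edges generalizing stack with
              | nil => simp
              | cons e rest _ => simp [List.foldl_append]
            have hmp := pvMu_push graph cur d stack s edges hlk hc
            rw [hfold]
            exact ih _ _ f2' (by omega) (by omega)

-- the canonical (fuel-independent) value of Source B's loop
def pvB (graph : List (String × List String)) (target : String)
    (stack : List (String × Int)) (s : List String) : Option Int :=
  pvRunBF graph target (pvMu graph stack s) stack s

theorem pvB_of_fuel (graph : List (String × List String)) (target : String)
    (f : Nat) (stack : List (String × Int)) (s : List String)
    (h : pvMu graph stack s ≤ f) :
    pvRunBF graph target f stack s = pvB graph target stack s :=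
  pvStable graph target f stack s _ h le_rfl

theorem pvB_nil (graph : List (String × List String)) (target : String) (s : List String) :
    pvB graph target [] s = none := pvRunBF_nil ..

theorem pvB_skip (graph : List (String × List String)) (target cur : String) (d : Int)
    (st : List (String × Int)) (s : List String)
    (h : List.lookup cur graph = none ∨ PySem.Set.contains s cur = true) :
    pvB graph target ((cur, d) :: st) s = pvB graph target st s := by
  have hmu : pvMu graph ((cur, d) :: st) s = pvMu graph st s + 1 := by
    simp only [pvMu, List.length_cons]; omega
  rw [pvB, hmu]
  rcases h with h | h
  · simp only [pvRunBF, h]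
    rfl
  · cases hlk : List.lookup cur graph with
    | none => simp only [pvRunBF, hlk]; rfl
    | some edges =>
      simp only [pvRunBF, hlk, h]
      simp only [if_true]
      rfl

theorem pvB_found (graph : List (String × List String)) (target cur : String) (d : Int)
    (st : List (String × Int)) (s edges : List String)
    (hlk : List.lookup cur graph = some edges) (hc : PySem.Set.contains s cur = false)
    (hT : edges.contains target = true) :
    pvB graph target ((cur, d) :: st) s = some d := by
  have hmu : pvMu graph ((cur, d) :: st) s = pvMu graph st s + 1 := by
    simp only [pvMu, List.length_cons]; omega
  rw [pvB, hmu]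
  simp only [pvRunBF, hlk, hc, Bool.false_eq_true, if_false, hT]
  simp

theorem pvB_push (graph : List (String × List String)) (target cur : String) (d : Int)
    (st : List (String × Int)) (s edges : List String)
    (hlk : List.lookup cur graph = some edges) (hc : PySem.Set.contains s cur = false)
    (hT : edges.contains target = false) :
    pvB graph target ((cur, d) :: st) s =
      pvB graph target (edges.map (fun e => (e, d + 1)) ++ st) (PySem.Set.add s cur) := by
  have hmu : pvMu graph ((cur, d) :: st) s = pvMu graph st s + 1 := by
    simp only [pvMu, List.length_cons]; omega
  rw [pvB, hmu]
  simp only [pvRunBF, hlk, hc, Bool.false_eq_true, if_false, hT]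
  have hfold : edges.reverse.foldl (fun st e => (e, d + 1) :: st) st
      = edges.map (fun e => (e, d + 1)) ++ st := by
    induction edges generalizing st with
    | nil => simp
    | cons e rest _ => simp [List.foldl_append]
  rw [hfold]
  have hmp := pvMu_push graph cur d st s edges hlk hc
  exact pvB_of_fuel graph target _ _ _ (by omega)

theorem pvScan_fst (target : String) (d : Int) :
    ∀ (l acc : List String), (pvScan target d l acc).1 = if l.contains target then some d else none := by
  intro l
  induction l with
  | nil => intro acc; simp [pvScan]
  | cons e rest ih =>
    intro acc
    by_cases he : e = target
    · subst he; simp [pvScan]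
    · have he' : (e == target) = false := by simp [he]
      have hne : ¬ target = e := fun h => he h.symm
      simp [pvScan, he', ih, hne]

theorem pvScan_snd (target : String) (d : Int) :
    ∀ (l acc : List String), l.contains target = false → (pvScan target d l acc).2 = acc ++ l := by
  intro l
  induction l with
  | nil => intro acc _; simp [pvScan]
  | cons e rest ih =>
    intro acc h
    simp only [List.contains_cons, Bool.or_eq_false_iff] at h
    have hne : ¬ e = target := fun h' => by subst h'; simp at h
    have he' : (e == target) = false := by simp [hne]
    simp [pvScan, he', ih _ h.2]

-- one-step equations (projection form) for pvRunA
theorem pvRunA_nil (graph : List (String × List String)) (target : String) (d : Int)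
    (s : List String) :
    (pvRunA graph target [] d s).1 = none ∧ (pvRunA graph target [] d s).2.1 = s := by
  rw [pvRunA]
  exact ⟨rfl, rfl⟩

theorem pvRunA_skip (graph : List (String × List String)) (target src : String)
    (rest : List String) (d : Int) (s : List String)
    (h : List.lookup src graph = none ∨ PySem.Set.contains s src = true) :
    (pvRunA graph target (src :: rest) d s).1 = (pvRunA graph target rest d s).1 ∧
    (pvRunA graph target (src :: rest) d s).2.1 = (pvRunA graph target rest d s).2.1 := by
  simp only [pvRunA]
  split
  · exact ⟨rfl, rfl⟩
  · next edges heq =>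
    rcases h with h | h
    · rw [h] at heq; simp at heq
    · rw [dif_pos h]
      exact ⟨rfl, rfl⟩

theorem pvRunA_found (graph : List (String × List String)) (target src : String)
    (rest : List String) (d : Int) (s edges : List String)
    (hlk : List.lookup src graph = some edges) (hc : PySem.Set.contains s src = false)
    (hT : edges.contains target = true) :
    (pvRunA graph target (src :: rest) d s).1 = some d ∧
    (pvRunA graph target (src :: rest) d s).2.1 = s := by
  simp only [pvRunA]
  split
  · next heq => rw [hlk] at heq; simp at heq
  · next edges' heq =>
    rw [hlk] at heq
    injection heq with heq
    subst heq
    rw [dif_neg (by simpa using hc)]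
    have hsc := pvScan_fst target d edges []
    rw [hT, if_pos rfl] at hsc
    split
    · next r snd heq2 => rw [heq2] at hsc; simp at hsc; subst hsc; exact ⟨rfl, rfl⟩
    · next to_check heq2 => rw [heq2] at hsc; exact absurd hsc (by simp)

theorem pvRunA_step (graph : List (String × List String)) (target src : String)
    (rest : List String) (d : Int) (s edges : List String)
    (hlk : List.lookup src graph = some edges) (hc : PySem.Set.contains s src = false)
    (hT : edges.contains target = false) :
    ((pvRunA graph target edges (d + 1) (PySem.Set.add s src)).1 = none →
      (pvRunA graph target (src :: rest) d s).1 =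
        (pvRunA graph target rest d (pvRunA graph target edges (d + 1) (PySem.Set.add s src)).2.1).1 ∧
      (pvRunA graph target (src :: rest) d s).2.1 =
        (pvRunA graph target rest d (pvRunA graph target edges (d + 1) (PySem.Set.add s src)).2.1).2.1) ∧
    (∀ r, (pvRunA graph target edges (d + 1) (PySem.Set.add s src)).1 = some r →
      (pvRunA graph target (src :: rest) d s).1 = some r) := by
  simp only [pvRunA]
  have hsc1 := pvScan_fst target d edges []
  have hsc2 := pvScan_snd target d edges [] hT
  rw [hT] at hsc1
  simp only [Bool.false_eq_true, if_false] at hsc1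
  split
  · next heq => rw [hlk] at heq; simp at heq
  · next edges' heq =>
    rw [hlk] at heq
    injection heq with heq
    subst heq
    rw [dif_neg (by simpa using hc)]
    split
    · next r snd heq2 => rw [heq2] at hsc1; exact absurd hsc1 (by simp)
    · next to_check heq2 =>
      rw [heq2] at hsc2
      simp only [List.nil_append] at hsc2
      subst hsc2
      split
      · next r s₂ h₂ heq3 =>
        constructor
        · intro hI; rw [heq3] at hI; exact absurd hI (by simp)
        · intro r' hI
          rw [heq3] at hI
          simp only at hI
          injection hI with hI
          subst hI
          rfl
      · next s₂ h₂ heq3 =>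
        constructor
        · intro _
          rw [heq3]
          exact ⟨rfl, rfl⟩
        · intro r hI
          rw [heq3] at hI
          exact absurd hI (by simp)

theorem pvMain (graph : List (String × List String)) (target : String) :
    ∀ (n : Nat) (srcs : List String) (d : Int) (s : List String) (rest : List (String × Int)),
      pvUnseen graph s = n →
      pvB graph target (srcs.map (fun x => (x, d)) ++ rest) s =
        (match (pvRunA graph target srcs d s).1 with
         | some r => some r
         | none => pvB graph target rest (pvRunA graph target srcs d s).2.1) := by
  intro n
  induction n using Nat.strong_induction_on with
  | _ n ihn =>
    intro srcs
    induction srcs with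
    | nil =>
      intro d s rest hn
      rw [(pvRunA_nil graph target d s).1, (pvRunA_nil graph target d s).2]
      simp
    | cons src srcs ih =>
      intro d s rest hn
      rw [List.map_cons, List.cons_append]
      cases hlk : List.lookup src graph with
      | none =>
        rw [pvB_skip graph target src d _ s (Or.inl hlk),
          (pvRunA_skip graph target src srcs d s (Or.inl hlk)).1,
          (pvRunA_skip graph target src srcs d s (Or.inl hlk)).2]
        exact ih d s rest hn
      | some edges =>
        by_cases hc : PySem.Set.contains s src = true
        · rw [pvB_skip graph target src d _ s (Or.inr hc),
            (pvRunA_skip graph target src srcs d s (Or.inr hc)).1,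
            (pvRunA_skip graph target src srcs d s (Or.inr hc)).2]
          exact ih d s rest hn
        · have hc' : PySem.Set.contains s src = false := eq_false_of_ne_true hc
          cases hT : edges.contains target with
          | true =>
            rw [pvB_found graph target src d _ s edges hlk hc' hT,
              (pvRunA_found graph target src srcs d s edges hlk hc' hT).1]
          | false =>
            rw [pvB_push graph target src d _ s edges hlk hc' hT]
            have hdec : pvUnseen graph (PySem.Set.add s src) < pvUnseen graph s :=
              pvUnseen_add_lt graph s src (pvLookup_mem graph src edges hlk) hc'
            have hinner := ihn (pvUnseen graph (PySem.Set.add s src)) (hn ▸ hdec)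
              edges (d + 1) (PySem.Set.add s src)
              (srcs.map (fun x => (x, d)) ++ rest) rfl
            rw [hinner]
            have hstep := pvRunA_step graph target src srcs d s edges hlk hc' hT
            cases hI : (pvRunA graph target edges (d + 1) (PySem.Set.add s src)).1 with
            | some r =>
              rw [hstep.2 r hI]
            | none =>
              rw [(hstep.1 hI).1, (hstep.1 hI).2]
              have hle : pvUnseen graph
                  (pvRunA graph target edges (d + 1) (PySem.Set.add s src)).2.1 < n :=
                hn ▸ lt_of_le_of_lt
                  (pvRunA graph target edges (d + 1) (PySem.Set.add s src)).2.2 hdec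
              exact ihn _ hle srcs d _ rest rfl

-- ===== VERDICT (by name: the statement is the Claim_ definition above) =====
theorem bfs_inner_spec : Claim_equal_bfs_inner := by
  intro graph source target depth searched _ _
  unfold Spec_bfs_inner bfs_inner bfs_inner_alt
  rw [pvB_of_fuel graph target _ _ _ (pvMu_le_fuel graph [(source, depth)] searched)]
  have h := pvMain graph target (pvUnseen graph searched) [source] depth searched [] rfl
  simp only [List.map_cons, List.map_nil, List.append_nil] at h
  rw [h]
  cases hI : (pvRunA graph target [source] depth searched).1 with
  | some r => rfl
  | none => simp [pvB_nil]
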